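-- pv_equiv track=rewrite | github.com/BUW-Comp-Prog-Project/WS_19 | Prem/codeforces/problem_b.py | check_permut
-- ===== SOURCE A (Python) =====
-- def check_permut(set_a):
--     top = max(set_a)
--     flag = True
--     for i in range(1, top+1):
--         if i in set_a :
--             flag = True
--         else:
--             flag = False
--             break
--
--     return flag
-- ===== SOURCE B (Python) =====
-- def check_permut(set_a):
--     top = max(set_a)
--     present = {x for x in set_a if 1 <= x <= top}
--     return len(present) == len(range(1, top + 1))
-- ===== Notes on version B (the rewrite author's own statement) =====
-- stated objective: alternative
-- what changed: Instead of scanning range(1, top+1) with a membership test on the collection and an early-break flag, B scans the collection once, collects its elements lying in [1, top] into a set, and compares that distinct count with the length of range(1, top+1).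
import Mathlib
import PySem

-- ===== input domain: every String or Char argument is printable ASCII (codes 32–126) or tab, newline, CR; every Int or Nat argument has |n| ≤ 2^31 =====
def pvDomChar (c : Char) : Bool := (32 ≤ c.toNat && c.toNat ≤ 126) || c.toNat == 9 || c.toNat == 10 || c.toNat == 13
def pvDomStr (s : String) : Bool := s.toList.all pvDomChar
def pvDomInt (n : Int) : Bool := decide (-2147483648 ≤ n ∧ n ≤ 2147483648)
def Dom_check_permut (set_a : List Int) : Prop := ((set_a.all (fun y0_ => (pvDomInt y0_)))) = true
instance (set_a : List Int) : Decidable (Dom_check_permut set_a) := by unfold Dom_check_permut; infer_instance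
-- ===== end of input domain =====

-- B replaces A's scan of range(1, top+1) with membership tests by a single pass over the
-- collection counting distinct elements in [1, top]; return value only, no side effects.

-- ===== PORT A =====
-- the for-loop over range(1, top+1) with break, as Python runs it: one counter, stop at the
-- first i not in set_a (the range is consumed lazily, not materialized)
def checkPermutLoopA (set_a : List Int) (i top : Int) : Bool :=
  if i ≤ top then
    if set_a.contains i then checkPermutLoopA set_a (i + 1) top else false
  else true
termination_by (top + 1 - i).toNat
decreasing_by omega

def check_permut (set_a : List Int) : Bool :=
  match PySem.List.max? set_a (fun x => x) with
  | none => false  -- Python raises ValueError here (max of empty); excluded by Pre_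
  | some top => checkPermutLoopA set_a 1 top

-- ===== PORT B =====
def check_permut_alt (set_a : List Int) : Bool :=
  match PySem.List.max? set_a (fun x => x) with
  | none => false  -- Python raises ValueError here (max of empty); excluded by Pre_
  | some top =>
    let present : PySem.Set Int :=
      PySem.Set.ofList (set_a.filter (fun x => decide (1 ≤ x) && decide (x ≤ top)))
    -- len(range(1, top+1)) : Python computes it arithmetically as max(0, (top+1)-1); exact
    present.length == ((top + 1) - 1).toNat

-- ===== PRECONDITION & SPEC =====
-- Pre_ excludes the empty list, on which both Pythons raise ValueError (max of an empty sequence).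
def Pre_check_permut (set_a : List Int) : Prop := set_a ≠ []
instance (set_a : List Int) : Decidable (Pre_check_permut set_a) := by unfold Pre_check_permut; infer_instance
def pvWitness_check_permut : List Int := ([3, 1, 2])

def Spec_check_permut (set_a : List Int) (out : Bool) : Prop := out = check_permut_alt set_a
instance (set_a : List Int) (out : Bool) : Decidable (Spec_check_permut set_a out) := by unfold Spec_check_permut; infer_instance

-- ===== CLAIM (what is proved, stated in full; the proofs are below) =====
def Claim_equal_check_permut : Prop := ∀ (set_a : List Int), Dom_check_permut set_a → Pre_check_permut set_a → Spec_check_permut set_a (check_permut set_a)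

-- ===== LEMMAS AND PROOFS =====

theorem checkPermutLoopA_eq_all (s : List Int) (i top : Int) :
    checkPermutLoopA s i top = (PySem.List.pyRange i (top + 1) 1).all s.contains := by
  fun_induction checkPermutLoopA s i top with
  | case1 i h hc ih =>
    rw [PySem.List.pyRange_one_cons (by omega)]
    simp only [List.all_cons, hc, Bool.true_and]
    exact ih
  | case2 i h hc =>
    rw [PySem.List.pyRange_one_cons (by omega)]
    have hc' : s.contains i = false := by simpa using hc
    simp only [List.all_cons, hc', Bool.false_and]
  | case3 i h =>
    rw [PySem.List.pyRange_one_eq_nil (by omega)]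
    rfl

theorem check_permut_count_eq_all (s : List Int) (top : Int) :
    ((PySem.Set.ofList (s.filter (fun x => decide (1 ≤ x) && decide (x ≤ top)))).length
        == ((top + 1) - 1).toNat)
      = (PySem.List.pyRange 1 (top + 1) 1).all s.contains := by
  set P : List Int := PySem.Set.ofList (s.filter (fun x => decide (1 ≤ x) && decide (x ≤ top))) with hP
  set R : List Int := PySem.List.pyRange 1 (top + 1) 1 with hR
  have hRnodup : R.Nodup := PySem.List.nodup_pyRange_one 1 (top + 1)
  have hPnodup : P.Nodup := PySem.Set.nodup_ofList _
  have hmemP : ∀ x, x ∈ P ↔ x ∈ s ∧ 1 ≤ x ∧ x ≤ top := by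
    intro x
    rw [hP, PySem.Set.mem_ofList, List.mem_filter]
    simp
  have hmemR : ∀ x, x ∈ R ↔ 1 ≤ x ∧ x < top + 1 := by
    intro x; rw [hR]; exact PySem.List.mem_pyRange_one
  have hPsubR : P.toFinset ⊆ R.toFinset := by
    intro x hx
    rw [List.mem_toFinset] at *
    rw [hmemR]
    have := (hmemP x).1 hx
    omega
  have hcardP : P.toFinset.card = P.length := List.toFinset_card_of_nodup hPnodup
  have hcardR : R.toFinset.card = R.length := List.toFinset_card_of_nodup hRnodup
  have hRlen : R.length = ((top + 1) - 1).toNat := by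
    rw [hR, PySem.List.length_pyRange_one]
  rw [← hRlen, Bool.eq_iff_iff]
  simp only [beq_iff_eq, List.all_eq_true, List.contains_iff_mem]
  constructor
  · intro hlen i hi
    have hle : R.toFinset.card ≤ P.toFinset.card := by omega
    have heq := Finset.eq_of_subset_of_card_le hPsubR hle
    have : i ∈ P.toFinset := by rw [heq, List.mem_toFinset]; exact hi
    rw [List.mem_toFinset, hmemP] at this
    exact this.1
  · intro hall
    have hRsubP : R.toFinset ⊆ P.toFinset := by
      intro x hx
      rw [List.mem_toFinset] at *
      have hx' := (hmemR x).1 hx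
      exact (hmemP x).2 ⟨hall x hx, by omega⟩
    have heq := Finset.Subset.antisymm hPsubR hRsubP
    rw [← hcardP, ← hcardR, heq]

-- ===== VERDICT (by name: the statement is the Claim_ definition above) =====
theorem check_permut_spec : Claim_equal_check_permut := by
  intro set_a _ _
  unfold Spec_check_permut check_permut check_permut_alt
  cases h : PySem.List.max? set_a (fun x => x) with
  | none => rfl
  | some top =>
    simp only
    rw [checkPermutLoopA_eq_all, check_permut_count_eq_all]
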